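-- pv_equiv track=rewrite | github.com/mRSun15/kg-transfer-gann | code/data_preprocess.py | GetEntityPos
-- ===== SOURCE A (Python) =====
-- def GetEntityPos(entity1, entity2, sentence):
--     pos_1 = 0
--     pos_2 = 0
--     for i in range(len(sentence)):
--         if sentence[i] == entity1:
--             pos_1 = i
--         if sentence[i] == entity2:
--             pos_2 = i
--     pos_first = min(pos_1, pos_2)
--     pos_second = pos_1 + pos_2 - pos_first
--     return [pos_first, pos_second]
-- ===== SOURCE B (Python) =====
-- def _last_pos(entity, sentence):
--     for i in range(len(sentence) - 1, -1, -1):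
--         if sentence[i] == entity:
--             return i
--     return 0
--
-- def GetEntityPos(entity1, entity2, sentence):
--     p1 = _last_pos(entity1, sentence)
--     p2 = _last_pos(entity2, sentence)
--     return [min(p1, p2), max(p1, p2)]
-- ===== Notes on version B (the rewrite author's own statement) =====
-- stated objective: alternative
-- what changed: Replaces the single forward pass tracking both positions with two independent early-exit reverse scans, and replaces the sum-minus-min trick with a direct max.
import Mathlib
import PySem

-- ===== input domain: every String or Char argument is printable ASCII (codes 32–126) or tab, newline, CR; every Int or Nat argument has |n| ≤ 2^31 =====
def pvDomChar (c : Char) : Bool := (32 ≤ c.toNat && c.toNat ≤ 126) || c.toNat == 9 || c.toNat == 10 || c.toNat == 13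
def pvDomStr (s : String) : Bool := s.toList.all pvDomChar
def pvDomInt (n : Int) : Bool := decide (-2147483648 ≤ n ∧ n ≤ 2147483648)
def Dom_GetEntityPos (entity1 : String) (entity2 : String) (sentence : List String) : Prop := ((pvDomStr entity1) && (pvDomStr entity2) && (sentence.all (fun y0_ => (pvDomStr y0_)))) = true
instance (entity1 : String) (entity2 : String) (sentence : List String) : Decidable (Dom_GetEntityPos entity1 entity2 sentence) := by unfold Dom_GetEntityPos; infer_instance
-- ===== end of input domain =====

-- B: two independent early-exit reverse scans for the last occurrence (default 0) and a direct min/max, instead of A's single forward pass with the sum-minus-min trick.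
-- ===== PORT A =====
def GetEntityPos (entity1 : String) (entity2 : String) (sentence : List String) : List Int :=
  let st := (List.range sentence.length).foldl
    (fun (p : Int × Int) i =>
      (if sentence.getD i "" = entity1 then (i : Int) else p.1,
       if sentence.getD i "" = entity2 then (i : Int) else p.2))
    (0, 0)
  let pos_first := min st.1 st.2
  let pos_second := st.1 + st.2 - pos_first
  [pos_first, pos_second]

-- ===== PORT B =====
-- reverse scan: checks indices n-1, n-2, …, 0 and returns the first match, else 0
def lastPosAux (entity : String) (sentence : List String) : Nat → Int
  | 0 => 0
  | n + 1 => if sentence.getD n "" = entity then (n : Int) else lastPosAux entity sentence n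

def lastPos (entity : String) (sentence : List String) : Int :=
  lastPosAux entity sentence sentence.length

def GetEntityPos_alt (entity1 : String) (entity2 : String) (sentence : List String) : List Int :=
  let p1 := lastPos entity1 sentence
  let p2 := lastPos entity2 sentence
  [min p1 p2, max p1 p2]

-- ===== PRECONDITION & SPEC =====
def Spec_GetEntityPos (entity1 : String) (entity2 : String) (sentence : List String) (out : List Int) : Prop := out = GetEntityPos_alt entity1 entity2 sentence
instance (entity1 : String) (entity2 : String) (sentence : List String) (out : List Int) : Decidable (Spec_GetEntityPos entity1 entity2 sentence out) := by unfold Spec_GetEntityPos; infer_instance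

-- ===== CLAIM (what is proved, stated in full; the proofs are below) =====
def Claim_equal_GetEntityPos : Prop := ∀ (entity1 : String) (entity2 : String) (sentence : List String), Dom_GetEntityPos entity1 entity2 sentence → Spec_GetEntityPos entity1 entity2 sentence (GetEntityPos entity1 entity2 sentence)

-- ===== LEMMAS AND PROOFS =====

-- ===== VERDICT (by name: the statement is the Claim_ definition above) =====
theorem foldl_eq_lastPosAux (e1 e2 : String) (s : List String) (n : Nat) :
    (List.range n).foldl
      (fun (p : Int × Int) i =>
        (if s.getD i "" = e1 then (i : Int) else p.1,
         if s.getD i "" = e2 then (i : Int) else p.2))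
      (0, 0)
    = (lastPosAux e1 s n, lastPosAux e2 s n) := by
  induction n with
  | zero => simp [lastPosAux]
  | succ n ih =>
    rw [List.range_succ, List.foldl_append, ih]
    simp only [List.foldl_cons, List.foldl_nil, lastPosAux]

theorem GetEntityPos_spec : Claim_equal_GetEntityPos := by
  intro e1 e2 s _
  unfold Spec_GetEntityPos GetEntityPos GetEntityPos_alt lastPos
  rw [foldl_eq_lastPosAux]
  simp only [List.cons.injEq, and_true]
  refine ⟨trivial, ?_⟩
  rcases le_total (lastPosAux e1 s s.length) (lastPosAux e2 s s.length) with h | h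
  · simp [h]
  · simp [h]
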